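-- pv_equiv track=rewrite | github.com/wangsun39/leetcode | allcode/2301-2400/2312sellingWood.py | sellingWood
-- ===== SOURCE A (Python) =====
-- from typing import List
-- from collections import defaultdict
-- from functools import lru_cache
-- from typing import List
--
-- def sellingWood(m: int, n: int, prices: List[List[int]]) -> int:
--     @lru_cache(None)
--     def dfs(length, width):
--         if length < ls[0] or width < ws[0]:
--             return 0
--         ans = d[(length, width)]
--         for i in range(1, length):
--             ans = max(ans, dfs(i, width) + dfs(length - i, width))
--         for i in range(1, width):
--             ans = max(ans, dfs(length, i) + dfs(length, width - i))
--         return ans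
--     d = defaultdict(int)
--     for e in prices:
--         d[(e[0], e[1])] = e[2]
--
--     ls, ws = [e[0] for e in prices], [e[1] for e in prices]
--     ls.sort()
--     ws.sort()
--     return dfs(m, n)
-- ===== SOURCE B (Python) =====
-- def sellingWood(m, n, prices):
--     price = {}
--     for e in prices:
--         price[(e[0], e[1])] = e[2]
--     dp = {}
--     for i in range(1, m + 1):
--         for j in range(1, n + 1):
--             best = price.get((i, j), 0)
--             for k in range(1, i):
--                 best = max(best, dp[(k, j)] + dp[(i - k, j)])
--             for k in range(1, j):
--                 best = max(best, dp[(i, k)] + dp[(i, j - k)])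
--             dp[(i, j)] = best
--     return dp.get((m, n), 0)
-- ===== Notes on version B (the rewrite author's own statement) =====
-- stated objective: alternative
-- what changed: Replaced the memoized top-down recursion (with a min-length/min-width pruning base case) by an iterative bottom-up tabulation: a dp table filled for i in 1..m, j in 1..n with the same guillotine-cut recurrence, returning dp[(m,n)].
-- outside the precondition, e.g. on sellingWood(0, 3, [[0, 1, 5]]): A returns 15, B returns 0; on sellingWood(-2, 1, [[-2, 1, 5]]): A returns 5, B returns 0
import Mathlib
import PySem

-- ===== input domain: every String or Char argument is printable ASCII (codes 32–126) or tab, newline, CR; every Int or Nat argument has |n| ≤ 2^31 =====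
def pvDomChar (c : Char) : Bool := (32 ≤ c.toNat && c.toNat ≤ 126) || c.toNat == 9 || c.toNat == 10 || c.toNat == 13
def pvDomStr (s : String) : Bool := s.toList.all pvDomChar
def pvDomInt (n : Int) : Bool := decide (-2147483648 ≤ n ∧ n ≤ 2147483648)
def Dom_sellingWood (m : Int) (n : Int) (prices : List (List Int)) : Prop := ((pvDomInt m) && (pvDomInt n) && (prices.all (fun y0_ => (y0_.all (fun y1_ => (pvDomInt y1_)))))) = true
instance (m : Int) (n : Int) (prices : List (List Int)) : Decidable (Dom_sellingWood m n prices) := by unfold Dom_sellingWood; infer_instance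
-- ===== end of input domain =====

-- B replaces A's memoized top-down recursion by an iterative bottom-up tabulation of the same
-- guillotine-cut recurrence (objective: alternative; same asymptotic cost).

-- ===== PORT A =====
-- d = defaultdict(int); for e in prices: d[(e[0], e[1])] = e[2]
-- (pyGetD is exact under Pre_, which demands rows of length ≥ 3; Python raises IndexError on shorter rows)
def pvDictA (prices : List (List Int)) : PySem.Dict (Int × Int) Int :=
  prices.foldl
    (fun d e =>
      d.insert (PySem.List.pyGetD e 0 0, PySem.List.pyGetD e 1 0) (PySem.List.pyGetD e 2 0))
    PySem.Dict.empty

-- functools.lru_cache ports as a memo dict threaded through dfs: each call first consults the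
-- cache and stores its result on return (so the port, like A, is polynomial, not exponential).
-- d[(l, w)] on a defaultdict(int) reads 0 when the key is absent = getD _ 0.
-- ans = d[(length, width)] is the init of the first running-max fold; the second for-loop folds
-- over its result.  .attach only carries the range membership for the termination proof.
def pvCacheA (key : Int × Int) (r : Int × PySem.Dict (Int × Int) Int) :
    Int × PySem.Dict (Int × Int) Int :=
  (r.1, r.2.insert key r.1)

def pvDfsA (d : PySem.Dict (Int × Int) Int) (ls0 ws0 : Int) (length width : Int)
    (memo : PySem.Dict (Int × Int) Int) : Int × PySem.Dict (Int × Int) Int :=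
  match memo.get? (length, width) with
  | some v => (v, memo)
  | none =>
    if length < ls0 ∨ width < ws0 then (0, (memo.insert (length, width) 0))
    else
      pvCacheA (length, width)
        ((PySem.List.pyRange 1 width 1).attach.foldl
          (fun p i =>
            let q1 := pvDfsA d ls0 ws0 length i.1 p.2
            let q2 := pvDfsA d ls0 ws0 length (width - i.1) q1.2
            (max p.1 (q1.1 + q2.1), q2.2))
          ((PySem.List.pyRange 1 length 1).attach.foldl
            (fun p i =>
              let q1 := pvDfsA d ls0 ws0 i.1 width p.2
              let q2 := pvDfsA d ls0 ws0 (length - i.1) width q1.2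
              (max p.1 (q1.1 + q2.1), q2.2))
            (d.getD (length, width) 0, memo)))
termination_by (length.toNat + width.toNat)
decreasing_by
  all_goals
    have := PySem.List.mem_pyRange_one.mp i.2
    omega

-- ls[0] / ws[0] raise IndexError on empty prices (excluded by Pre_); pyGetD _ 0 0 is exact there
def sellingWood (m : Int) (n : Int) (prices : List (List Int)) : Int :=
  let d := pvDictA prices
  let ls := PySem.List.sorted (prices.map (fun e => PySem.List.pyGetD e 0 0)) (fun x => x) false
  let ws := PySem.List.sorted (prices.map (fun e => PySem.List.pyGetD e 1 0)) (fun x => x) false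
  (pvDfsA d (PySem.List.pyGetD ls 0 0) (PySem.List.pyGetD ws 0 0) m n PySem.Dict.empty).1

-- ===== PORT B =====
-- price = {}; for e in prices: price[(e[0], e[1])] = e[2]   (rows of length ≥ 3 by Pre_, as in A)
def pvPriceB (prices : List (List Int)) : PySem.Dict (Int × Int) Int :=
  prices.foldl
    (fun d e =>
      d.insert (PySem.List.pyGetD e 0 0, PySem.List.pyGetD e 1 0) (PySem.List.pyGetD e 2 0))
    PySem.Dict.empty

-- the body of the double loop: best for cell (i, j), the two k-loops folding the running max over
-- best = price.get((i, j), 0).  dp[(k, j)] etc. are plain dict indexing in Source B; inside Pre_ every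
-- looked-up key was filled by an earlier iteration, so getD _ 0 is exact.
def pvCellB (price dp : PySem.Dict (Int × Int) Int) (i j : Int) : Int :=
  (PySem.List.pyRange 1 j 1).foldl
    (fun acc k => max acc (dp.getD (i, k) 0 + dp.getD (i, j - k) 0))
    ((PySem.List.pyRange 1 i 1).foldl
      (fun acc k => max acc (dp.getD (k, j) 0 + dp.getD (i - k, j) 0))
      (price.getD (i, j) 0))

-- dp.get((m, n), 0): 0 when the full board was never tabulated (m < 1 or n < 1)
def sellingWood_alt (m : Int) (n : Int) (prices : List (List Int)) : Int :=
  let price := pvPriceB prices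
  let dp := (PySem.List.pyRange 1 (m + 1) 1).foldl
    (fun acc i =>
      (PySem.List.pyRange 1 (n + 1) 1).foldl
        (fun acc2 j => acc2.insert (i, j) (pvCellB price acc2 i j)) acc)
    PySem.Dict.empty
  dp.getD (m, n) 0

-- ===== PRECONDITION & SPEC =====
-- Pre_ excludes A's crash inputs (empty prices, rows shorter than 3: IndexError).  For boards with
-- m < 1 or n < 1 (outside the problem's 1 ≤ m, n domain) it admits those where every priced row is
-- strictly longer, or every one strictly wider, than the board (both return 0 there); it excludes
-- the remaining double-degenerate corner where a nonpositive-dimension priced row fits the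
-- nonpositive board and A's defaultdict recursion returns an accidental value while B returns 0.
def Pre_sellingWood (m : Int) (n : Int) (prices : List (List Int)) : Prop :=
  prices ≠ [] ∧ (∀ e ∈ prices, 3 ≤ e.length) ∧
    ((1 ≤ m ∧ 1 ≤ n) ∨ (∀ e ∈ prices, m < PySem.List.pyGetD e 0 0) ∨
      (∀ e ∈ prices, n < PySem.List.pyGetD e 1 0))
instance (m : Int) (n : Int) (prices : List (List Int)) : Decidable (Pre_sellingWood m n prices) := by
  unfold Pre_sellingWood; infer_instance

def pvWitness_sellingWood : Int × Int × List (List Int) := (2, 3, [[1, 2, 7], [2, 3, 10]])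

def Spec_sellingWood (m : Int) (n : Int) (prices : List (List Int)) (out : Int) : Prop := out = sellingWood_alt m n prices
instance (m : Int) (n : Int) (prices : List (List Int)) (out : Int) : Decidable (Spec_sellingWood m n prices out) := by unfold Spec_sellingWood; infer_instance

-- ===== CLAIM (what is proved, stated in full; the proofs are below) =====
def Claim_equal_sellingWood : Prop := ∀ (m : Int) (n : Int) (prices : List (List Int)), Dom_sellingWood m n prices → Pre_sellingWood m n prices → Spec_sellingWood m n prices (sellingWood m n prices)

-- ===== LEMMAS AND PROOFS =====

-- the common mathematical recurrence both programs compute: value of an l × w board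
def pvF (d : PySem.Dict (Int × Int) Int) (l w : Int) : Int :=
  (PySem.List.pyRange 1 w 1).attach.foldl
    (fun acc i => max acc (pvF d l i.1 + pvF d l (w - i.1)))
    ((PySem.List.pyRange 1 l 1).attach.foldl
      (fun acc i => max acc (pvF d i.1 w + pvF d (l - i.1) w))
      (d.getD (l, w) 0))
termination_by (l.toNat + w.toNat)
decreasing_by
  all_goals
    have := PySem.List.mem_pyRange_one.mp i.2
    omega

theorem pv_foldl_max_zero {α : Type} (l : List α) (g : α → Int) (h : ∀ x ∈ l, g x = 0) :
    l.foldl (fun a x => max a (g x)) 0 = 0 := by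
  induction l with
  | nil => rfl
  | cons x t ih =>
      simp only [List.foldl_cons, h x (by simp)]
      exact ih (fun y hy => h y (by simp [hy]))

theorem pv_foldl_attach_max (l : List Int) (g : Int → Int) (init : Int) :
    l.attach.foldl (fun acc x => max acc (g x.1)) init
      = l.foldl (fun acc k => max acc (g k)) init :=
  List.foldl_attach (f := fun acc k => max acc (g k))

-- every key of the foldl-built dict comes from a row of the list
-- every key of a foldl-insert-built dict comes from an element of the list
theorem pv_foldl_insert_contains {α : Type} (key : α → Int × Int)
    (val : PySem.Dict (Int × Int) Int → α → Int) (p : Int × Int) :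
    ∀ (l : List α) (d0 : PySem.Dict (Int × Int) Int),
      (l.foldl (fun d e => d.insert (key e) (val d e)) d0).contains p = true →
      d0.contains p = true ∨ ∃ e ∈ l, p = key e := by
  intro l
  induction l with
  | nil => intro d0 h; exact Or.inl h
  | cons e t ih =>
      intro d0 h
      rcases ih (d0.insert (key e) (val d0 e)) h with h' | ⟨e', he', hp⟩
      · rw [PySem.Dict.contains_insert] at h'
        rcases Bool.or_eq_true_iff.mp h' with h'' | h''
        · exact Or.inr ⟨e, by simp, by simpa using h''⟩
        · exact Or.inl h''
      · exact Or.inr ⟨e', by simp [he'], hp⟩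

-- the head of the sorted projection list is the projection of some row
theorem pv_head_sorted_elem (prices : List (List Int)) (key : List Int → Int)
    (hne : prices ≠ []) :
    ∃ e ∈ prices,
      PySem.List.pyGetD (PySem.List.sorted (prices.map key) (fun x => x) false) 0 0 = key e := by
  rcases hs : PySem.List.sorted (prices.map key) (fun x => x) false with _ | ⟨m0, t⟩
  · exact absurd ((PySem.List.sorted_eq_nil_iff _ _ _).mp hs) (by simp [hne])
  · have hm0 : m0 ∈ prices.map key := by
      rw [← PySem.List.mem_sorted (key := fun x => x) (rev := false), hs]
      exact List.mem_cons_self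
    rcases List.mem_map.mp hm0 with ⟨e, he, hkey⟩
    exact ⟨e, he, by rw [PySem.List.pyGetD_zero_cons, ← hkey]⟩

-- every key of A's price dict is bounded below by ls[0] and ws[0]
theorem pv_hK (prices : List (List Int)) (hne : prices ≠ []) :
    ∀ p : Int × Int, (pvDictA prices).contains p = true →
      PySem.List.pyGetD
        (PySem.List.sorted (prices.map (fun e => PySem.List.pyGetD e 0 0)) (fun x => x) false) 0 0 ≤ p.1 ∧
      PySem.List.pyGetD
        (PySem.List.sorted (prices.map (fun e => PySem.List.pyGetD e 1 0)) (fun x => x) false) 0 0 ≤ p.2 := by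
  intro p hp
  rcases pv_foldl_insert_contains
      (fun e => (PySem.List.pyGetD e 0 0, PySem.List.pyGetD e 1 0))
      (fun _ e => PySem.List.pyGetD e 2 0) p prices PySem.Dict.empty hp with h | ⟨e, he, hpe⟩
  · simp [PySem.Dict.contains_empty] at h
  · subst hpe
    constructor
    · rcases hs : PySem.List.sorted (prices.map (fun e => PySem.List.pyGetD e 0 0)) (fun x => x) false with _ | ⟨m0, t⟩
      · exact absurd ((PySem.List.sorted_eq_nil_iff _ _ _).mp hs) (by simp [hne])
      · show PySem.List.pyGetD (m0 :: t) 0 0 ≤ PySem.List.pyGetD e 0 0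
        rw [PySem.List.pyGetD_zero_cons]
        exact PySem.List.key_head_sorted_le _ _ hs _ (List.mem_map_of_mem he)
    · rcases hs : PySem.List.sorted (prices.map (fun e => PySem.List.pyGetD e 1 0)) (fun x => x) false with _ | ⟨m0, t⟩
      · exact absurd ((PySem.List.sorted_eq_nil_iff _ _ _).mp hs) (by simp [hne])
      · show PySem.List.pyGetD (m0 :: t) 0 0 ≤ PySem.List.pyGetD e 1 0
        rw [PySem.List.pyGetD_zero_cons]
        exact PySem.List.key_head_sorted_le _ _ hs _ (List.mem_map_of_mem he)

-- the pruning in A's dfs is sound: a board thinner than every priced length (or narrower than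
-- every priced width) is worth 0 under the recurrence
theorem pvF_eq_zero (d : PySem.Dict (Int × Int) Int) (ls0 ws0 : Int)
    (hK : ∀ p : Int × Int, d.contains p = true → ls0 ≤ p.1 ∧ ws0 ≤ p.2) :
    ∀ (N : Nat) (l w : Int), l.toNat + w.toNat ≤ N → (l < ls0 ∨ w < ws0) → pvF d l w = 0 := by
  intro N
  induction N using Nat.strong_induction_on with
  | _ N ih =>
    intro l w hN hlt
    rw [pvF]
    have hbase : d.getD (l, w) 0 = 0 := by
      by_cases hc : d.contains (l, w) = true
      · rcases hK _ hc with ⟨h1, h2⟩; omega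
      · exact PySem.Dict.getD_of_not_contains d 0 (by simpa using hc)
    rw [hbase]
    rw [pv_foldl_max_zero _ _ (fun x hx => by
      have hb := PySem.List.mem_pyRange_one.mp x.2
      have m1 : pvF d x.1 w = 0 := by
        refine ih (x.1.toNat + w.toNat) (by omega) _ _ (le_refl _) ?_
        rcases hlt with h | h
        · exact Or.inl (by omega)
        · exact Or.inr h
      have m2 : pvF d (l - x.1) w = 0 := by
        refine ih ((l - x.1).toNat + w.toNat) (by omega) _ _ (le_refl _) ?_
        rcases hlt with h | h
        · exact Or.inl (by omega)
        · exact Or.inr h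
      rw [m1, m2]
      rfl)]
    exact pv_foldl_max_zero _ _ (fun x hx => by
      have hb := PySem.List.mem_pyRange_one.mp x.2
      have m1 : pvF d l x.1 = 0 := by
        refine ih (l.toNat + x.1.toNat) (by omega) _ _ (le_refl _) ?_
        rcases hlt with h | h
        · exact Or.inl h
        · exact Or.inr (by omega)
      have m2 : pvF d l (w - x.1) = 0 := by
        refine ih (l.toNat + (w - x.1).toNat) (by omega) _ _ (le_refl _) ?_
        rcases hlt with h | h
        · exact Or.inl h
        · exact Or.inr (by omega)
      rw [m1, m2]
      rfl)

-- a running-max fold that threads a memo dict through two sub-calls per element, assuming each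
-- sub-call returns its pure value and preserves the memo invariant
theorem pv_fold_pair {α : Type} (P : PySem.Dict (Int × Int) Int → Prop)
    (f g : α → PySem.Dict (Int × Int) Int → Int × PySem.Dict (Int × Int) Int)
    (fv gv : α → Int) :
    ∀ (l : List α),
    (∀ x ∈ l, ∀ mem, P mem → (f x mem).1 = fv x ∧ P (f x mem).2) →
    (∀ x ∈ l, ∀ mem, P mem → (g x mem).1 = gv x ∧ P (g x mem).2) →
    ∀ (acc : Int) (memo : PySem.Dict (Int × Int) Int), P memo →
      (l.foldl (fun p x =>
          (max p.1 ((f x p.2).1 + (g x (f x p.2).2).1), (g x (f x p.2).2).2)) (acc, memo)).1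
        = l.foldl (fun a x => max a (fv x + gv x)) acc
      ∧ P (l.foldl (fun p x =>
          (max p.1 ((f x p.2).1 + (g x (f x p.2).2).1), (g x (f x p.2).2).2)) (acc, memo)).2 := by
  intro l
  induction l with
  | nil => intro _ _ acc memo hP; exact ⟨rfl, hP⟩
  | cons x t ih =>
      intro hf hg acc memo hP
      obtain ⟨hf1, hf2⟩ := hf x (by simp) memo hP
      obtain ⟨hg1, hg2⟩ := hg x (by simp) (f x memo).2 hf2
      simp only [List.foldl_cons, hf1, hg1]
      exact ih (fun y hy => hf y (by simp [hy])) (fun y hy => hg y (by simp [hy]))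
        (max acc (fv x + gv x)) (g x (f x memo).2).2 hg2

-- A's memoised dfs computes the recurrence and keeps the cache truthful
theorem pvDfsA_eq (d : PySem.Dict (Int × Int) Int) (ls0 ws0 : Int)
    (hK : ∀ p : Int × Int, d.contains p = true → ls0 ≤ p.1 ∧ ws0 ≤ p.2) :
    ∀ (N : Nat) (l w : Int) (memo : PySem.Dict (Int × Int) Int), l.toNat + w.toNat ≤ N →
    (∀ (k : Int × Int) (v : Int), memo.get? k = some v → v = pvF d k.1 k.2) →
    (pvDfsA d ls0 ws0 l w memo).1 = pvF d l w ∧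
    (∀ (k : Int × Int) (v : Int),
      (pvDfsA d ls0 ws0 l w memo).2.get? k = some v → v = pvF d k.1 k.2) := by
  intro N
  induction N using Nat.strong_induction_on with
  | _ N ih =>
    intro l w memo hN hInv
    rw [pvDfsA]
    rcases hget : memo.get? (l, w) with _ | v
    · simp only []
      split
      · -- pruned: cached 0 is the recurrence value
        rename_i hprune
        have h0 : pvF d l w = 0 :=
          pvF_eq_zero d ls0 ws0 hK (l.toNat + w.toNat) l w (le_refl _) hprune
        refine ⟨h0.symm, ?_⟩
        intro k v hk
        rw [PySem.Dict.get?_insert] at hk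
        by_cases hkl : k = (l, w)
        · rw [if_pos hkl] at hk
          cases hk
          rw [hkl]
          exact h0.symm
        · rw [if_neg hkl] at hk
          exact hInv k v hk
      · rename_i hprune
        have hfold1 := pv_fold_pair
          (fun mem => ∀ (k : Int × Int) (v : Int), mem.get? k = some v → v = pvF d k.1 k.2)
          (fun (x : {x // x ∈ PySem.List.pyRange 1 l 1}) mem => pvDfsA d ls0 ws0 x.1 w mem)
          (fun x mem => pvDfsA d ls0 ws0 (l - x.1) w mem)
          (fun x => pvF d x.1 w) (fun x => pvF d (l - x.1) w)
          (PySem.List.pyRange 1 l 1).attach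
          (fun x _ mem hP => by
            have hb := PySem.List.mem_pyRange_one.mp x.2
            exact ih (x.1.toNat + w.toNat) (by omega) _ _ mem (le_refl _) hP)
          (fun x _ mem hP => by
            have hb := PySem.List.mem_pyRange_one.mp x.2
            exact ih ((l - x.1).toNat + w.toNat) (by omega) _ _ mem (le_refl _) hP)
          (d.getD (l, w) 0) memo hInv
        have hfold2 := pv_fold_pair
          (fun mem => ∀ (k : Int × Int) (v : Int), mem.get? k = some v → v = pvF d k.1 k.2)
          (fun (x : {x // x ∈ PySem.List.pyRange 1 w 1}) mem => pvDfsA d ls0 ws0 l x.1 mem)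
          (fun x mem => pvDfsA d ls0 ws0 l (w - x.1) mem)
          (fun x => pvF d l x.1) (fun x => pvF d l (w - x.1))
          (PySem.List.pyRange 1 w 1).attach
          (fun x _ mem hP => by
            have hb := PySem.List.mem_pyRange_one.mp x.2
            exact ih (l.toNat + x.1.toNat) (by omega) _ _ mem (le_refl _) hP)
          (fun x _ mem hP => by
            have hb := PySem.List.mem_pyRange_one.mp x.2
            exact ih (l.toNat + (w - x.1).toNat) (by omega) _ _ mem (le_refl _) hP)
          ((PySem.List.pyRange 1 l 1).attach.foldl
            (fun p x =>
              (max p.1 ((pvDfsA d ls0 ws0 x.1 w p.2).1 +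
                  (pvDfsA d ls0 ws0 (l - x.1) w (pvDfsA d ls0 ws0 x.1 w p.2).2).1),
                (pvDfsA d ls0 ws0 (l - x.1) w (pvDfsA d ls0 ws0 x.1 w p.2).2).2))
            (d.getD (l, w) 0, memo)).1
          ((PySem.List.pyRange 1 l 1).attach.foldl
            (fun p x =>
              (max p.1 ((pvDfsA d ls0 ws0 x.1 w p.2).1 +
                  (pvDfsA d ls0 ws0 (l - x.1) w (pvDfsA d ls0 ws0 x.1 w p.2).2).1),
                (pvDfsA d ls0 ws0 (l - x.1) w (pvDfsA d ls0 ws0 x.1 w p.2).2).2))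
            (d.getD (l, w) 0, memo)).2
          hfold1.2
        have e1 : ((PySem.List.pyRange 1 l 1).attach.foldl
            (fun p x =>
              (max p.1 ((pvDfsA d ls0 ws0 x.1 w p.2).1 +
                  (pvDfsA d ls0 ws0 (l - x.1) w (pvDfsA d ls0 ws0 x.1 w p.2).2).1),
                (pvDfsA d ls0 ws0 (l - x.1) w (pvDfsA d ls0 ws0 x.1 w p.2).2).2))
            (d.getD (l, w) 0, memo)).1
            = (PySem.List.pyRange 1 l 1).attach.foldl
                (fun a x => max a (pvF d x.1 w + pvF d (l - x.1) w)) (d.getD (l, w) 0) :=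
          hfold1.1
        have e2 : ((PySem.List.pyRange 1 w 1).attach.foldl
            (fun p x =>
              (max p.1 ((pvDfsA d ls0 ws0 l x.1 p.2).1 +
                  (pvDfsA d ls0 ws0 l (w - x.1) (pvDfsA d ls0 ws0 l x.1 p.2).2).1),
                (pvDfsA d ls0 ws0 l (w - x.1) (pvDfsA d ls0 ws0 l x.1 p.2).2).2))
            (((PySem.List.pyRange 1 l 1).attach.foldl
            (fun p x =>
              (max p.1 ((pvDfsA d ls0 ws0 x.1 w p.2).1 +
                  (pvDfsA d ls0 ws0 (l - x.1) w (pvDfsA d ls0 ws0 x.1 w p.2).2).1),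
                (pvDfsA d ls0 ws0 (l - x.1) w (pvDfsA d ls0 ws0 x.1 w p.2).2).2))
            (d.getD (l, w) 0, memo)).1, ((PySem.List.pyRange 1 l 1).attach.foldl
            (fun p x =>
              (max p.1 ((pvDfsA d ls0 ws0 x.1 w p.2).1 +
                  (pvDfsA d ls0 ws0 (l - x.1) w (pvDfsA d ls0 ws0 x.1 w p.2).2).1),
                (pvDfsA d ls0 ws0 (l - x.1) w (pvDfsA d ls0 ws0 x.1 w p.2).2).2))
            (d.getD (l, w) 0, memo)).2)).1
            = (PySem.List.pyRange 1 w 1).attach.foldl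
                (fun a x => max a (pvF d l x.1 + pvF d l (w - x.1)))
                ((PySem.List.pyRange 1 l 1).attach.foldl
            (fun p x =>
              (max p.1 ((pvDfsA d ls0 ws0 x.1 w p.2).1 +
                  (pvDfsA d ls0 ws0 (l - x.1) w (pvDfsA d ls0 ws0 x.1 w p.2).2).1),
                (pvDfsA d ls0 ws0 (l - x.1) w (pvDfsA d ls0 ws0 x.1 w p.2).2).2))
            (d.getD (l, w) 0, memo)).1 :=
          hfold2.1
        conv at e2 => rhs; rw [e1]
        have hv2 : ((PySem.List.pyRange 1 w 1).attach.foldl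
            (fun p x =>
              (max p.1 ((pvDfsA d ls0 ws0 l x.1 p.2).1 +
                  (pvDfsA d ls0 ws0 l (w - x.1) (pvDfsA d ls0 ws0 l x.1 p.2).2).1),
                (pvDfsA d ls0 ws0 l (w - x.1) (pvDfsA d ls0 ws0 l x.1 p.2).2).2))
            (((PySem.List.pyRange 1 l 1).attach.foldl
            (fun p x =>
              (max p.1 ((pvDfsA d ls0 ws0 x.1 w p.2).1 +
                  (pvDfsA d ls0 ws0 (l - x.1) w (pvDfsA d ls0 ws0 x.1 w p.2).2).1),
                (pvDfsA d ls0 ws0 (l - x.1) w (pvDfsA d ls0 ws0 x.1 w p.2).2).2))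
            (d.getD (l, w) 0, memo)).1, ((PySem.List.pyRange 1 l 1).attach.foldl
            (fun p x =>
              (max p.1 ((pvDfsA d ls0 ws0 x.1 w p.2).1 +
                  (pvDfsA d ls0 ws0 (l - x.1) w (pvDfsA d ls0 ws0 x.1 w p.2).2).1),
                (pvDfsA d ls0 ws0 (l - x.1) w (pvDfsA d ls0 ws0 x.1 w p.2).2).2))
            (d.getD (l, w) 0, memo)).2)).1 = pvF d l w := by
          rw [pvF]
          exact e2
        refine ⟨hv2, ?_⟩
        show ∀ (k : Int × Int) (v : Int), (pvCacheA (l, w) _).2.get? k = some v → _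
        intro k v hk
        simp only [pvCacheA] at hk
        rw [PySem.Dict.get?_insert] at hk
        by_cases hkl : k = (l, w)
        · rw [if_pos hkl] at hk
          cases hk
          rw [hkl]
          exact hv2
        · rw [if_neg hkl] at hk
          exact hfold2.2 k v hk
    · -- cache hit
      simp only []
      exact ⟨hInv (l, w) v hget, hInv⟩

-- one cell of B's table, computed from already-correct earlier cells, is the recurrence value
theorem pvCellB_eq (price dp : PySem.Dict (Int × Int) Int) (n i j : Int)
    (hi : 1 ≤ i) (hj : 1 ≤ j) (hjn : j ≤ n)
    (hdp : ∀ a b : Int, 1 ≤ a → 1 ≤ b → ((a < i ∧ b ≤ n) ∨ (a = i ∧ b < j)) →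
      dp.getD (a, b) 0 = pvF price a b) :
    pvCellB price dp i j = pvF price i j := by
  rw [pvCellB, pvF]
  have e1 : (PySem.List.pyRange 1 i 1).attach.foldl
      (fun acc x => max acc (pvF price x.1 j + pvF price (i - x.1) j))
      (price.getD (i, j) 0)
      = (PySem.List.pyRange 1 i 1).foldl
      (fun acc k => max acc (pvF price k j + pvF price (i - k) j))
      (price.getD (i, j) 0) :=
    pv_foldl_attach_max _ (fun k => pvF price k j + pvF price (i - k) j) _
  have e2 : ∀ init : Int, (PySem.List.pyRange 1 j 1).attach.foldl
      (fun acc x => max acc (pvF price i x.1 + pvF price i (j - x.1))) init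
      = (PySem.List.pyRange 1 j 1).foldl
      (fun acc k => max acc (pvF price i k + pvF price i (j - k))) init :=
    fun init => pv_foldl_attach_max _ (fun k => pvF price i k + pvF price i (j - k)) init
  rw [e1, e2]
  have h1 : (PySem.List.pyRange 1 i 1).foldl
      (fun acc k => max acc (dp.getD (k, j) 0 + dp.getD (i - k, j) 0))
      (price.getD (i, j) 0)
      = (PySem.List.pyRange 1 i 1).foldl
      (fun acc k => max acc (pvF price k j + pvF price (i - k) j))
      (price.getD (i, j) 0) := by
    refine PySem.List.foldl_congr_mem _ _ _ _ (fun acc k hk => ?_)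
    have hb := PySem.List.mem_pyRange_one.mp hk
    rw [hdp k j (by omega) hj (Or.inl ⟨by omega, hjn⟩),
        hdp (i - k) j (by omega) hj (Or.inl ⟨by omega, hjn⟩)]
  rw [h1]
  refine PySem.List.foldl_congr_mem _ _ _ _ (fun acc k hk => ?_)
  have hb := PySem.List.mem_pyRange_one.mp hk
  rw [hdp i k hi (by omega) (Or.inr ⟨rfl, by omega⟩),
      hdp i (j - k) hi (by omega) (Or.inr ⟨rfl, by omega⟩)]

-- B's inner loop (row i, columns j..n) extends correctness to the whole row
theorem pv_inner_loop (price : PySem.Dict (Int × Int) Int) (n i : Int) (hi : 1 ≤ i) :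
    ∀ (t : Nat) (j : Int) (dp : PySem.Dict (Int × Int) Int), (n + 1 - j).toNat ≤ t → 1 ≤ j →
    (∀ a b : Int, 1 ≤ a → 1 ≤ b → ((a < i ∧ b ≤ n) ∨ (a = i ∧ b < j)) →
      dp.getD (a, b) 0 = pvF price a b) →
    ∀ a b : Int, 1 ≤ a → 1 ≤ b → ((a < i ∧ b ≤ n) ∨ (a = i ∧ b < n + 1)) →
      ((PySem.List.pyRange j (n + 1) 1).foldl
        (fun acc2 j' => acc2.insert (i, j') (pvCellB price acc2 i j')) dp).getD (a, b) 0
        = pvF price a b := by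
  intro t
  induction t with
  | zero =>
      intro j dp ht hj hdp a b ha hb hcond
      rw [PySem.List.pyRange_one_eq_nil (a := j) (b := n + 1) (by omega)]
      simp only [List.foldl_nil]
      refine hdp a b ha hb ?_
      rcases hcond with h | h
      · exact Or.inl h
      · exact Or.inr ⟨h.1, by omega⟩
  | succ t ih =>
      intro j dp ht hj hdp a b ha hb hcond
      by_cases hend : n + 1 ≤ j
      · rw [PySem.List.pyRange_one_eq_nil (a := j) (b := n + 1) hend]
        simp only [List.foldl_nil]
        refine hdp a b ha hb ?_
        rcases hcond with h | h
        · exact Or.inl h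
        · exact Or.inr ⟨h.1, by omega⟩
      · rw [PySem.List.pyRange_one_cons (a := j) (b := n + 1) (by omega)]
        simp only [List.foldl_cons]
        have hcell : pvCellB price dp i j = pvF price i j :=
          pvCellB_eq price dp n i j hi hj (by omega) hdp
        rw [hcell]
        refine ih (j + 1) _ (by omega) (by omega) ?_ a b ha hb hcond
        intro a' b' ha' hb' hcond'
        rw [PySem.Dict.getD_insert]
        by_cases heq : (a', b') = (i, j)
        · rw [if_pos heq]
          have h1 : a' = i := congrArg Prod.fst heq
          have h2 : b' = j := congrArg Prod.snd heq
          rw [h1, h2]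
        · rw [if_neg heq]
          refine hdp a' b' ha' hb' ?_
          rcases hcond' with h | h
          · exact Or.inl h
          · refine Or.inr ⟨h.1, ?_⟩
            have hbj : b' ≠ j := fun hbj => heq (by rw [h.1, hbj])
            omega

-- B's outer loop fills rows i..m
theorem pv_outer_loop (price : PySem.Dict (Int × Int) Int) (m n : Int) :
    ∀ (t : Nat) (i : Int) (dp : PySem.Dict (Int × Int) Int), (m + 1 - i).toNat ≤ t → 1 ≤ i →
    (∀ a b : Int, 1 ≤ a → 1 ≤ b → a < i → b ≤ n → dp.getD (a, b) 0 = pvF price a b) →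
    ∀ a b : Int, 1 ≤ a → 1 ≤ b → a < m + 1 → b ≤ n →
      ((PySem.List.pyRange i (m + 1) 1).foldl
        (fun acc i' =>
          (PySem.List.pyRange 1 (n + 1) 1).foldl
            (fun acc2 j' => acc2.insert (i', j') (pvCellB price acc2 i' j')) acc) dp).getD (a, b) 0
        = pvF price a b := by
  intro t
  induction t with
  | zero =>
      intro i dp ht hi hdp a b ha hb ham hbn
      rw [PySem.List.pyRange_one_eq_nil (a := i) (b := m + 1) (by omega)]
      simp only [List.foldl_nil]
      exact hdp a b ha hb (by omega) hbn
  | succ t ih =>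
      intro i dp ht hi hdp a b ha hb ham hbn
      by_cases hend : m + 1 ≤ i
      · rw [PySem.List.pyRange_one_eq_nil (a := i) (b := m + 1) hend]
        simp only [List.foldl_nil]
        exact hdp a b ha hb (by omega) hbn
      · rw [PySem.List.pyRange_one_cons (a := i) (b := m + 1) (by omega)]
        simp only [List.foldl_cons]
        refine ih (i + 1) _ (by omega) (by omega) ?_ a b ha hb ham hbn
        intro a' b' ha' hb' hai hbn'
        refine pv_inner_loop price n i hi (n + 1 - 1).toNat 1 dp (by omega) (by omega) ?_ a' b' ha' hb' ?_
        · intro a'' b'' ha'' hb'' hcond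
          rcases hcond with h | h
          · exact hdp a'' b'' ha'' hb'' h.1 h.2
          · omega
        · by_cases hlt : a' < i
          · exact Or.inl ⟨hlt, hbn'⟩
          · exact Or.inr ⟨by omega, by omega⟩

theorem pvB_eq (m n : Int) (prices : List (List Int)) (hm : 1 ≤ m) (hn : 1 ≤ n) :
    sellingWood_alt m n prices = pvF (pvPriceB prices) m n := by
  show ((PySem.List.pyRange 1 (m + 1) 1).foldl
    (fun acc i =>
      (PySem.List.pyRange 1 (n + 1) 1).foldl
        (fun acc2 j => acc2.insert (i, j) (pvCellB (pvPriceB prices) acc2 i j)) acc)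
    PySem.Dict.empty).getD (m, n) 0 = _
  refine pv_outer_loop (pvPriceB prices) m n (m + 1 - 1).toNat 1 PySem.Dict.empty
    (by omega) (by omega) ?_ m n hm hn (by omega) (le_refl n)
  intro a b ha hb hlt hbn
  omega

-- keys of B's table are positive cells, so the table has no entry for a degenerate board
theorem pvB_outer_keys (price : PySem.Dict (Int × Int) Int) (n : Int) (p : Int × Int) :
    ∀ (l : List Int) (d0 : PySem.Dict (Int × Int) Int),
      ((l.foldl (fun acc i' =>
          (PySem.List.pyRange 1 (n + 1) 1).foldl
            (fun acc2 j' => acc2.insert (i', j') (pvCellB price acc2 i' j')) acc) d0).contains p = true) →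
      d0.contains p = true ∨ ∃ i' ∈ l, ∃ j' ∈ PySem.List.pyRange 1 (n + 1) 1, p = (i', j') := by
  intro l
  induction l with
  | nil => intro d0 h; exact Or.inl h
  | cons e t ih =>
      intro d0 h
      rcases ih _ h with h' | ⟨i', hi', j', hj', hp⟩
      · rcases pv_foldl_insert_contains (fun j' => (e, j'))
            (fun d j' => pvCellB price d e j') p _ d0 h' with h'' | ⟨j', hj', hp⟩
        · exact Or.inl h''
        · exact Or.inr ⟨e, by simp, j', hj', hp⟩
      · exact Or.inr ⟨i', by simp [hi'], j', hj', hp⟩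

theorem pvB_degenerate (m n : Int) (prices : List (List Int)) (h : m < 1 ∨ n < 1) :
    sellingWood_alt m n prices = 0 := by
  show ((PySem.List.pyRange 1 (m + 1) 1).foldl
    (fun acc i =>
      (PySem.List.pyRange 1 (n + 1) 1).foldl
        (fun acc2 j => acc2.insert (i, j) (pvCellB (pvPriceB prices) acc2 i j)) acc)
    PySem.Dict.empty).getD (m, n) 0 = 0
  by_cases hc : ((PySem.List.pyRange 1 (m + 1) 1).foldl
      (fun acc i =>
        (PySem.List.pyRange 1 (n + 1) 1).foldl
          (fun acc2 j => acc2.insert (i, j) (pvCellB (pvPriceB prices) acc2 i j)) acc)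
      PySem.Dict.empty).contains (m, n) = true
  · exfalso
    rcases pvB_outer_keys (pvPriceB prices) n (m, n) _ _ hc with h' | ⟨i', hi', j', hj', hp⟩
    · simp [PySem.Dict.contains_empty] at h'
    · have h1 := PySem.List.mem_pyRange_one.mp hi'
      have h2 := PySem.List.mem_pyRange_one.mp hj'
      have hm : m = i' := congrArg Prod.fst hp
      have hn : n = j' := congrArg Prod.snd hp
      omega
  · exact PySem.Dict.getD_of_not_contains _ 0 (by simpa using hc)

theorem pvA_eq (m n : Int) (prices : List (List Int)) (hne : prices ≠ []) :
    sellingWood m n prices = pvF (pvDictA prices) m n := by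
  show (pvDfsA (pvDictA prices)
    (PySem.List.pyGetD (PySem.List.sorted (prices.map (fun e => PySem.List.pyGetD e 0 0)) (fun x => x) false) 0 0)
    (PySem.List.pyGetD (PySem.List.sorted (prices.map (fun e => PySem.List.pyGetD e 1 0)) (fun x => x) false) 0 0)
    m n PySem.Dict.empty).1 = _
  exact (pvDfsA_eq (pvDictA prices) _ _ (pv_hK prices hne) (m.toNat + n.toNat) m n
    PySem.Dict.empty (le_refl _)
    (fun k v hk => by simp [PySem.Dict.get?_empty] at hk)).1

-- ===== VERDICT (by name: the statement is the Claim_ definition above) =====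
theorem sellingWood_spec : Claim_equal_sellingWood := by
  intro m n prices _ hpre
  obtain ⟨hne, _, hdom⟩ := hpre
  unfold Spec_sellingWood
  by_cases hmn : 1 ≤ m ∧ 1 ≤ n
  · rw [pvA_eq m n prices hne, pvB_eq m n prices hmn.1 hmn.2]
    rfl
  · rw [pvA_eq m n prices hne, pvB_degenerate m n prices (by omega)]
    refine pvF_eq_zero (pvDictA prices) _ _ (pv_hK prices hne)
      (m.toNat + n.toNat) m n (le_refl _) ?_
    rcases hdom with h | h | h
    · exact absurd h hmn
    · obtain ⟨e, he, heq⟩ := pv_head_sorted_elem prices (fun e => PySem.List.pyGetD e 0 0) hne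
      exact Or.inl (by rw [heq]; exact h e he)
    · obtain ⟨e, he, heq⟩ := pv_head_sorted_elem prices (fun e => PySem.List.pyGetD e 1 0) hne
      exact Or.inr (by rw [heq]; exact h e he)
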